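-- pv_equiv track=rewrite | github.com/koftezz/rolling-lookahead-dt | rollo_oct/oct/tree.py | get_child
-- ===== SOURCE A (Python) =====
-- def get_child(current_depth: int, target_depth: int, child_node: int) -> int:
--     """
--
--     :param current_depth:
--     :param target_depth:
--     :param child_node:
--     :return:
--     """
--     counter = 0
--     if target_depth > current_depth:
--         while counter < (target_depth - current_depth):
--             if child_node % 2 == 0:
--                 child_node = child_node * 2
--             else:
--                 child_node = (child_node * 2) + 1
--             counter += 1
--         return child_node
-- ===== SOURCE B (Python) =====
-- def get_child(current_depth: int, target_depth: int, child_node: int) -> int: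
--     # Closed form: parity is preserved by each step, so d doublings give
--     # even child -> child << d, odd child -> (child << d) + (1 << d) - 1.
--     if target_depth <= current_depth:
--         return None
--     d = target_depth - current_depth
--     if child_node % 2 == 0:
--         return child_node << d
--     return (child_node << d) + (1 << d) - 1
-- ===== Notes on version B (the rewrite author's own statement) =====
-- stated objective: alternative
-- what changed: Replaces the per-level doubling loop with a closed-form bit-shift formula (even: child<<d, odd: (child<<d)+(1<<d)-1), using that parity is invariant under the step.
import Mathlib
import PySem

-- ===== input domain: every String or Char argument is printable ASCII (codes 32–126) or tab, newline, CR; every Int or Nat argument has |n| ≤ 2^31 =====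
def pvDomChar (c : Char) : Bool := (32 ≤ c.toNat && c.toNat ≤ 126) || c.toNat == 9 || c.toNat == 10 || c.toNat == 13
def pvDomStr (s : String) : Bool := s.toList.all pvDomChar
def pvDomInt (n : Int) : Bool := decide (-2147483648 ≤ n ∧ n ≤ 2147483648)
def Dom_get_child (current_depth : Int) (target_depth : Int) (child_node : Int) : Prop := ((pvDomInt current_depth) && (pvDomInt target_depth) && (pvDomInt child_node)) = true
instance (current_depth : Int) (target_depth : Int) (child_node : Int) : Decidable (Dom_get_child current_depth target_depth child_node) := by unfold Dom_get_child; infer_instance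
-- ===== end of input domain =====

-- B replaces A's per-level doubling loop with a closed-form shift formula (parity is invariant under the step).


-- ===== PORT A =====
-- while loop: 'counter' counting up to target_depth - current_depth, rewritten as
-- structural recursion on the (nonnegative) remaining iteration count
def gcLoop (k : Nat) (child_node : Int) : Int :=
  match k with
  | 0 => child_node
  | k + 1 =>
      if PySem.Int.mod child_node 2 == 0 then gcLoop k (child_node * 2)
      else gcLoop k (child_node * 2 + 1)

def get_child (current_depth : Int) (target_depth : Int) (child_node : Int) : Option Int :=
  if target_depth > current_depth then
    some (gcLoop (target_depth - current_depth).toNat child_node)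
  else
    none  -- Python falls off the function: implicit None

-- ===== PORT B =====
def get_child_alt (current_depth : Int) (target_depth : Int) (child_node : Int) : Option Int :=
  if target_depth ≤ current_depth then none
  else
    let d := (target_depth - current_depth).toNat  -- x << d = x * 2^d
    if PySem.Int.mod child_node 2 == 0 then some (child_node * 2 ^ d)
    else some (child_node * 2 ^ d + (2 ^ d - 1))

-- ===== PRECONDITION & SPEC =====
def Spec_get_child (current_depth : Int) (target_depth : Int) (child_node : Int) (out : Option Int) : Prop := out = get_child_alt current_depth target_depth child_node
instance (current_depth : Int) (target_depth : Int) (child_node : Int) (out : Option Int) : Decidable (Spec_get_child current_depth target_depth child_node out) := by unfold Spec_get_child; infer_instance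

-- ===== CLAIM (what is proved, stated in full; the proofs are below) =====
def Claim_equal_get_child : Prop := ∀ (current_depth : Int) (target_depth : Int) (child_node : Int), Dom_get_child current_depth target_depth child_node → Spec_get_child current_depth target_depth child_node (get_child current_depth target_depth child_node)

-- ===== LEMMAS AND PROOFS =====
theorem gcLoop_closed (k : Nat) (c : Int) :
    gcLoop k c = if PySem.Int.mod c 2 == 0 then c * 2 ^ k else c * 2 ^ k + (2 ^ k - 1) := by
  have hm : ∀ x : Int, PySem.Int.mod x 2 = x % 2 := by
    intro x; simp [PySem.Int.mod, Int.fmod_eq_emod]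
  induction k generalizing c with
  | zero => simp [gcLoop]
  | succ k ih =>
      by_cases h : c % 2 = 0
      · have hb : (PySem.Int.mod c 2 == 0) = true := by rw [hm]; simp only [beq_iff_eq]; omega
        have hb2 : (PySem.Int.mod (c * 2) 2 == 0) = true := by rw [hm]; simp only [beq_iff_eq]; omega
        have e1 : gcLoop (k + 1) c = gcLoop k (c * 2) := by
          show (if PySem.Int.mod c 2 == 0 then gcLoop k (c * 2) else gcLoop k (c * 2 + 1)) = _
          rw [hb]; rfl
        rw [e1, ih, hb]
        have : (PySem.Int.mod (c * 2) 2 == 0) = true := hb2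
        rw [this]
        simp [pow_succ]; ring
      · have hb : (PySem.Int.mod c 2 == 0) = false := by rw [hm]; simp only [beq_eq_false_iff_ne, ne_eq]; omega
        have hb2 : (PySem.Int.mod (c * 2 + 1) 2 == 0) = false := by rw [hm]; simp only [beq_eq_false_iff_ne, ne_eq]; omega
        have e1 : gcLoop (k + 1) c = gcLoop k (c * 2 + 1) := by
          show (if PySem.Int.mod c 2 == 0 then gcLoop k (c * 2) else gcLoop k (c * 2 + 1)) = _
          rw [hb]; rfl
        rw [e1, ih, hb, hb2]
        simp [pow_succ]; ring

-- ===== VERDICT (by name: the statement is the Claim_ definition above) =====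
theorem get_child_spec : Claim_equal_get_child := by
  intro cd td cn _
  unfold Spec_get_child get_child get_child_alt
  by_cases h : td > cd
  · have h' : ¬ td ≤ cd := by omega
    simp only [h, h', if_pos]
    rw [gcLoop_closed]
    split <;> rfl
  · have h' : td ≤ cd := by omega
    simp [h, h']
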